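-- pv_equiv track=rewrite | github.com/CodecoolMSC2017/Task_force_X | task1_solution.py | many_whelps_handle_it
-- ===== SOURCE A (Python) =====
-- def many_whelps_handle_it(table):
--     raid_members = 0
--     whelps = 0
--     for elem in table:
--         if elem == "W":
--             whelps += 1
--         elif elem == "R":
--             raid_members += 1
--     if whelps > raid_members:
--         return "LEEEEEEROY JENNNKINS"
--     if whelps == raid_members:
--         return "dunno"
--     if whelps < raid_members:
--         return "Hit it like you mean it"
-- ===== SOURCE B (Python) =====
-- def many_whelps_handle_it(table):
--     # Cancellation stack: a 'W' cancels a pending 'R' and vice versa, so the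
--     # stack only ever holds survivors of one single kind; they decide the answer.
--     stack = []
--     for elem in table:
--         if elem == "W":
--             if stack and stack[-1] == "R":
--                 stack.pop()
--             else:
--                 stack.append("W")
--         elif elem == "R":
--             if stack and stack[-1] == "W":
--                 stack.pop()
--             else:
--                 stack.append("R")
--     if not stack:
--         return "dunno"
--     if stack[-1] == "W":
--         return "LEEEEEEROY JENNNKINS"
--     return "Hit it like you mean it"
-- ===== Notes on version B (the rewrite author's own statement) =====
-- stated objective: alternative
-- what changed: Replaces the two counters with a cancellation stack (as in bracket matching): each 'W' annihilates a pending 'R' and vice versa, so the final stack holds survivors of one kind only and the answer is read off the top of the stack instead of comparing counts.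
import Mathlib
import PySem

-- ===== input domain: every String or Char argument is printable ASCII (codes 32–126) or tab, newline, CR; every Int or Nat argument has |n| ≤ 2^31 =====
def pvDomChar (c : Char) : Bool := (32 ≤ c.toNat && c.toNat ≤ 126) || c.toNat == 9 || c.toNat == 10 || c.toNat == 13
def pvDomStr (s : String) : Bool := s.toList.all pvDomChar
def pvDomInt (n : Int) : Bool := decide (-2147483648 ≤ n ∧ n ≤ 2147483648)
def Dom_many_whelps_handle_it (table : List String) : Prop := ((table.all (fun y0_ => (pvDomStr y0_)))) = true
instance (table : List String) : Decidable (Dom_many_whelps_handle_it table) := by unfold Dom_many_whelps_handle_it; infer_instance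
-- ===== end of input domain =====

-- B replaces A's two counters by a cancellation stack (as in bracket matching): opposite
-- tokens annihilate and the survivors decide the answer (objective: alternative algorithm).

-- ===== PORT A =====
-- state = (raid_members, whelps), exactly A's two counters
def many_whelps_handle_it (table : List String) : String :=
  let p := table.foldl (fun (st : Int × Int) elem =>
    if elem = "W" then (st.1, st.2 + 1)
    else if elem = "R" then (st.1 + 1, st.2)
    else st) (0, 0)
  if p.2 > p.1 then "LEEEEEEROY JENNNKINS"
  else if p.2 = p.1 then "dunno"
  else "Hit it like you mean it"

-- ===== PORT B =====
-- stack with its top at the HEAD of the list ('stack[-1]' = head?, append = cons, pop = tail)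
def many_whelps_handle_it_alt (table : List String) : String :=
  let stack := table.foldl (fun (stack : List String) elem =>
    if elem = "W" then
      (if stack.head? = some "R" then stack.tail else "W" :: stack)
    else if elem = "R" then
      (if stack.head? = some "W" then stack.tail else "R" :: stack)
    else stack) []
  match stack.head? with
  | none => "dunno"
  | some t => if t = "W" then "LEEEEEEROY JENNNKINS" else "Hit it like you mean it"

-- ===== PRECONDITION & SPEC =====
def Spec_many_whelps_handle_it (table : List String) (out : String) : Prop := out = many_whelps_handle_it_alt table
instance (table : List String) (out : String) : Decidable (Spec_many_whelps_handle_it table out) := by unfold Spec_many_whelps_handle_it; infer_instance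

-- ===== CLAIM (what is proved, stated in full; the proofs are below) =====
def Claim_equal_many_whelps_handle_it : Prop := ∀ (table : List String), Dom_many_whelps_handle_it table → Spec_many_whelps_handle_it table (many_whelps_handle_it table)

-- ===== LEMMAS AND PROOFS =====

-- proof-side names for the two loop bodies (definitionally the lambdas in the ports)
def pvAstep : Int × Int → String → Int × Int := fun st elem =>
  if elem = "W" then (st.1, st.2 + 1)
  else if elem = "R" then (st.1 + 1, st.2)
  else st

def pvBstep : List String → String → List String := fun stack elem =>
  if elem = "W" then
    (if stack.head? = some "R" then stack.tail else "W" :: stack)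
  else if elem = "R" then
    (if stack.head? = some "W" then stack.tail else "R" :: stack)
  else stack

def pvHom (s : List String) : Prop := (∀ x ∈ s, x = "W") ∨ (∀ x ∈ s, x = "R")

def pvVal (s : List String) : Int := (s.count "W" : Int) - (s.count "R" : Int)

theorem pv_step (st : Int × Int) (stack : List String) (e : String)
    (hP : pvHom stack) (hv : pvVal stack = st.2 - st.1) :
    pvHom (pvBstep stack e) ∧ pvVal (pvBstep stack e) = (pvAstep st e).2 - (pvAstep st e).1 := by
  unfold pvAstep pvBstep pvHom pvVal at *
  by_cases hW : e = "W"
  · rw [if_pos hW, if_pos hW]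
    by_cases hh : stack.head? = some "R"
    · rw [if_pos hh]
      obtain ⟨a, l, rfl⟩ : ∃ a l, stack = a :: l := by
        cases stack with
        | nil => simp at hh
        | cons a l => exact ⟨a, l, rfl⟩
      simp only [List.head?_cons, Option.some.injEq] at hh
      subst hh
      constructor
      · rcases hP with h | h
        · exact absurd (h "R" (by simp)) (by decide)
        · exact Or.inr fun x hx => h x (List.mem_cons_of_mem _ hx)
      · simp only [List.tail_cons, List.count_cons] at hv ⊢
        simp only [show ("R" == "R") = true from by decide] at hv
        push_cast at hv ⊢
        omega
    · rw [if_neg hh]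
      constructor
      · refine Or.inl ?_
        intro x hx
        rcases List.mem_cons.mp hx with rfl | hx2
        · rfl
        · rcases hP with h | h
          · exact h x hx2
          · cases stack with
            | nil => simp at hx2
            | cons a l =>
              exact absurd (by simp [h a (by simp)] : (a :: l : List String).head? = some "R") hh
      · simp only [List.count_cons,
          show ("W" == "W") = true from by decide]
        push_cast
        omega
  · rw [if_neg hW, if_neg hW]
    by_cases hR : e = "R"
    · rw [if_pos hR, if_pos hR]
      by_cases hh : stack.head? = some "W"
      · rw [if_pos hh]
        obtain ⟨a, l, rfl⟩ : ∃ a l, stack = a :: l := by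
          cases stack with
          | nil => simp at hh
          | cons a l => exact ⟨a, l, rfl⟩
        simp only [List.head?_cons, Option.some.injEq] at hh
        subst hh
        constructor
        · rcases hP with h | h
          · exact Or.inl fun x hx => h x (List.mem_cons_of_mem _ hx)
          · exact absurd (h "W" (by simp)) (by decide)
        · simp only [List.tail_cons, List.count_cons] at hv ⊢
          simp only [show ("W" == "W") = true from by decide] at hv
          push_cast at hv ⊢
          omega
      · rw [if_neg hh]
        constructor
        · refine Or.inr ?_
          intro x hx
          rcases List.mem_cons.mp hx with rfl | hx2
          · rfl
          · rcases hP with h | h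
            · cases stack with
              | nil => simp at hx2
              | cons a l =>
                exact absurd (by simp [h a (by simp)] : (a :: l : List String).head? = some "W") hh
            · exact h x hx2
        · simp only [List.count_cons,
            show ("R" == "R") = true from by decide]
          push_cast
          omega
    · rw [if_neg hR, if_neg hR]
      exact ⟨hP, hv⟩

theorem pv_inv (table : List String) (st : Int × Int) (stack : List String)
    (hP : pvHom stack) (hv : pvVal stack = st.2 - st.1) :
    pvHom (table.foldl pvBstep stack) ∧
      pvVal (table.foldl pvBstep stack) =
        (table.foldl pvAstep st).2 - (table.foldl pvAstep st).1 := by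
  induction table generalizing st stack with
  | nil => exact ⟨hP, hv⟩
  | cons x xs ih =>
    simp only [List.foldl_cons]
    obtain ⟨h1, h2⟩ := pv_step st stack x hP hv
    exact ih _ _ h1 h2

-- ===== VERDICT (by name: the statement is the Claim_ definition above) =====
theorem many_whelps_handle_it_spec : Claim_equal_many_whelps_handle_it := by
  intro table _
  unfold Spec_many_whelps_handle_it many_whelps_handle_it many_whelps_handle_it_alt
  obtain ⟨hP, hv⟩ := pv_inv table (0, 0) [] (Or.inl (by simp)) (by simp [pvVal])
  unfold pvBstep at hP hv
  unfold pvAstep at hv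
  set p := table.foldl (fun (st : Int × Int) elem =>
    if elem = "W" then (st.1, st.2 + 1)
    else if elem = "R" then (st.1 + 1, st.2)
    else st) (0, 0) with hp
  set stack := table.foldl (fun (stack : List String) elem =>
    if elem = "W" then
      (if stack.head? = some "R" then stack.tail else "W" :: stack)
    else if elem = "R" then
      (if stack.head? = some "W" then stack.tail else "R" :: stack)
    else stack) [] with hs
  unfold pvVal at hv
  unfold pvHom at hP
  clear_value stack
  clear hs
  cases stack with
  | nil =>
    simp at hv
    simp only [List.head?_nil]
    have : p.2 = p.1 := by omega
    rw [if_neg (by omega), if_pos this]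
  | cons a l =>
    simp only [List.head?_cons]
    by_cases ha : a = "W"
    · rw [if_pos ha]
      subst ha
      have hall : ∀ x ∈ ("W" :: l), x = "W" := by
        rcases hP with h | h
        · exact h
        · exact absurd (h "W" (by simp)) (by decide)
      have hcW : ("W" :: l).count "W" = ("W" :: l).length :=
        List.count_eq_length.mpr (fun b hb => by rw [hall b hb])
      have hcR : ("W" :: l).count "R" = 0 :=
        List.count_eq_zero.mpr (fun hmem => absurd (hall _ hmem) (by decide))
      rw [hcW, hcR] at hv
      have hlen : (0:Int) < ("W" :: l).length := by simp
      rw [if_pos (by omega)]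
    · rw [if_neg ha]
      have hall : ∀ x ∈ (a :: l), x = "R" := by
        rcases hP with h | h
        · exact absurd (h a (by simp)) ha
        · exact h
      have hcR : (a :: l).count "R" = (a :: l).length :=
        List.count_eq_length.mpr (fun b hb => by rw [hall b hb])
      have hcW : (a :: l).count "W" = 0 :=
        List.count_eq_zero.mpr (fun hmem => absurd (hall _ hmem) (by decide))
      rw [hcW, hcR] at hv
      have hlen : (0:Int) < (a :: l).length := by simp
      rw [if_neg (by omega), if_neg (by omega)]
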